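-- pv_equiv track=rewrite | github.com/vitorgregory/Music-Download | app/queue_manager.py | find_error_in_logs
-- ===== SOURCE A (Python) =====
-- def find_error_in_logs(logs):
--     """Analisa logs procurando o motivo real da falha"""
--     if not logs: return "Erro desconhecido"
--
--     # Convert deque to list for slicing
--     log_list = list(logs) if hasattr(logs, '__iter__') else logs
--
--     # Procura do fim para o começo
--     for line in reversed(log_list[-50:]):
--         l = line.lower()
--
--         # Erros Críticos de DRM/Codec
--         if "no codec found" in l: return "Erro DRM: Codec não encontrado (Relogar)"
--         if "failed to extract" in l: return "Falha na extração"
--         if "unauthorized" in l or "401" in l: return "Erro 401: Token Expirado"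
--         if "geo restricted" in l: return "Bloqueio de Região"
--
--         # Erros Genéricos
--         if "error" in l or "failed" in l or "panic" in l:
--             return line[-40:] # Retorna pedaço do erro
--
--     return "Falha no processo"
-- ===== SOURCE B (Python) =====
-- # B: rule-table classifier per line + single forward pass keeping the last match
-- # (A scans reversed with early return; last match forward == first match backward).
--
-- _RULES = [
--     (("no codec found",), "Erro DRM: Codec não encontrado (Relogar)"),
--     (("failed to extract",), "Falha na extração"),
--     (("unauthorized", "401"), "Erro 401: Token Expirado"),
--     (("geo restricted",), "Bloqueio de Região"),
-- ]
-- _GENERIC = ("error", "failed", "panic")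
--
--
-- def _classify(line):
--     l = line.lower()
--     for pats, msg in _RULES:
--         if any(p in l for p in pats):
--             return msg
--     if any(k in l for k in _GENERIC):
--         return line[-40:]
--     return None
--
--
-- def find_error_in_logs(logs):
--     if not logs:
--         return "Erro desconhecido"
--     log_list = list(logs) if hasattr(logs, '__iter__') else logs
--     result = "Falha no processo"
--     for line in log_list[-50:]:
--         c = _classify(line)
--         if c is not None:
--             result = c
--     return result
-- ===== Notes on version B (the rewrite author's own statement) =====
-- stated objective: idiomatic
-- what changed: B factors the per-line checks into a data-driven rule table consulted by a classify helper, and replaces A's reversed scan with early returns by a single forward pass over the 50-line window that keeps the last classified line.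
import Mathlib
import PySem

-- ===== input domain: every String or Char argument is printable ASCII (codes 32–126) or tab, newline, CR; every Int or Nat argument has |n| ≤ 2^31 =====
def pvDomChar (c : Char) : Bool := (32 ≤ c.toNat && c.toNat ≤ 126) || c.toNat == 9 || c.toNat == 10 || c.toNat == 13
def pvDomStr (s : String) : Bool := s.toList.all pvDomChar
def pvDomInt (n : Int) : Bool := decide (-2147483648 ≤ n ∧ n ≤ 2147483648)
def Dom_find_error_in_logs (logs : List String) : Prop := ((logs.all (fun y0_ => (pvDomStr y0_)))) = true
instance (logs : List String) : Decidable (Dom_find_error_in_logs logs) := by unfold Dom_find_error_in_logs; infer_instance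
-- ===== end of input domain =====

-- B replaces A's if-chain by a data-driven rule table and A's reversed early-return
-- scan by one forward pass keeping the last classified line (idiomatic decomposition).

-- ===== PORT A =====
-- the reversed loop of A: first matching line (scanning the reversed window) decides
def findErrGoA : List String → String
  | [] => "Falha no processo"
  | line :: rest =>
    let l := PySem.Str.lower line
    if PySem.Str.isIn "no codec found" l then "Erro DRM: Codec não encontrado (Relogar)"
    else if PySem.Str.isIn "failed to extract" l then "Falha na extração"
    else if PySem.Str.isIn "unauthorized" l || PySem.Str.isIn "401" l then "Erro 401: Token Expirado"
    else if PySem.Str.isIn "geo restricted" l then "Bloqueio de Região"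
    else if PySem.Str.isIn "error" l || PySem.Str.isIn "failed" l || PySem.Str.isIn "panic" l then
      PySem.Str.slice line (some (-40)) none
    else findErrGoA rest

def find_error_in_logs (logs : List String) : String :=
  if logs = [] then "Erro desconhecido"
  else findErrGoA (PySem.List.slice logs (some (-50)) none).reverse

-- ===== PORT B =====
def findErrRules : List (List String × String) :=
  [ (["no codec found"], "Erro DRM: Codec não encontrado (Relogar)")
  , (["failed to extract"], "Falha na extração")
  , (["unauthorized", "401"], "Erro 401: Token Expirado")
  , (["geo restricted"], "Bloqueio de Região") ]

def findErrGeneric : List String := ["error", "failed", "panic"]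

def findErrClassify (line : String) : Option String :=
  let l := PySem.Str.lower line
  match findErrRules.find? (fun r => r.1.any (fun p => PySem.Str.isIn p l)) with
  | some r => some r.2
  | none =>
    if findErrGeneric.any (fun k => PySem.Str.isIn k l) then
      some (PySem.Str.slice line (some (-40)) none)
    else none

def find_error_in_logs_alt (logs : List String) : String :=
  if logs = [] then "Erro desconhecido"
  else
    (PySem.List.slice logs (some (-50)) none).foldl
      (fun result line =>
        match findErrClassify line with
        | some c => c
        | none => result)
      "Falha no processo"

-- ===== PRECONDITION & SPEC =====
def Spec_find_error_in_logs (logs : List String) (out : String) : Prop := out = find_error_in_logs_alt logs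
instance (logs : List String) (out : String) : Decidable (Spec_find_error_in_logs logs out) := by unfold Spec_find_error_in_logs; infer_instance

-- ===== CLAIM (what is proved, stated in full; the proofs are below) =====
def Claim_equal_find_error_in_logs : Prop := ∀ (logs : List String), Dom_find_error_in_logs logs → Spec_find_error_in_logs logs (find_error_in_logs logs)

-- ===== LEMMAS AND PROOFS =====

-- per line, A's if-chain decides exactly what classify returns
theorem findErrGoA_cons (line : String) (rest : List String) :
    findErrGoA (line :: rest) =
      match findErrClassify line with
      | some c => c
      | none => findErrGoA rest := by
  simp only [findErrGoA, findErrClassify, findErrRules, findErrGeneric, List.find?,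
    List.any_cons, List.any_nil, Bool.or_false]
  cases h1 : PySem.Str.isIn "no codec found" (PySem.Str.lower line) <;>
    cases h2 : PySem.Str.isIn "failed to extract" (PySem.Str.lower line) <;>
    cases h3 : PySem.Str.isIn "unauthorized" (PySem.Str.lower line) <;>
    cases h4 : PySem.Str.isIn "401" (PySem.Str.lower line) <;>
    cases h5 : PySem.Str.isIn "geo restricted" (PySem.Str.lower line) <;>
    simp_all [or_assoc] <;> split_ifs <;> rfl

theorem findErrGoA_reverse (l : List String) :
    findErrGoA l.reverse =
      l.foldl (fun result line =>
          match findErrClassify line with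
          | some c => c
          | none => result)
        "Falha no processo" := by
  induction l using List.reverseRecOn with
  | nil => rfl
  | append_singleton ys y ih =>
    rw [List.reverse_append, List.reverse_singleton, List.singleton_append,
      findErrGoA_cons, ih, List.foldl_append]
    rfl

-- ===== VERDICT (by name: the statement is the Claim_ definition above) =====
theorem find_error_in_logs_spec : Claim_equal_find_error_in_logs := by
  intro logs _
  unfold Spec_find_error_in_logs find_error_in_logs find_error_in_logs_alt
  split_ifs with h
  · rfl
  · exact findErrGoA_reverse _
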